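-- pv_equiv track=rewrite | github.com/AustinL997/5m-data-1.1-intro-data-science | Wenyi_assignment.py/Wenyi(Austin)_Assignment.py | count_repeats
-- ===== SOURCE A (Python) =====
-- def count_repeats(string): #Question 4
--     char_count = {}
--     repeated_count = 0
--
--     for char in string:
--         if char in char_count:
--             char_count[char] += 1
--         else:
--             char_count[char] = 1
--
--     for count in char_count.values():
--         if count > 1:
--             repeated_count += count
--     return repeated_count
-- ===== SOURCE B (Python) =====
-- def count_repeats(string):
--     # Sort the characters so equal characters become contiguous, then scan
--     # the sorted list once adding the length of every run longer than 1.
--     chars = sorted(string)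
--     n = len(chars)
--     total = 0
--     i = 0
--     while i < n:
--         j = i + 1
--         while j < n and chars[j] == chars[i]:
--             j += 1
--         if j - i > 1:
--             total += j - i
--         i = j
--     return total
-- ===== Notes on version B (the rewrite author's own statement) =====
-- stated objective: alternative
-- what changed: Replaces the frequency dictionary with sort-then-scan: sort the characters so equal ones are contiguous, then one linear scan over the sorted list adds the length of every run longer than 1.
import Mathlib
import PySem

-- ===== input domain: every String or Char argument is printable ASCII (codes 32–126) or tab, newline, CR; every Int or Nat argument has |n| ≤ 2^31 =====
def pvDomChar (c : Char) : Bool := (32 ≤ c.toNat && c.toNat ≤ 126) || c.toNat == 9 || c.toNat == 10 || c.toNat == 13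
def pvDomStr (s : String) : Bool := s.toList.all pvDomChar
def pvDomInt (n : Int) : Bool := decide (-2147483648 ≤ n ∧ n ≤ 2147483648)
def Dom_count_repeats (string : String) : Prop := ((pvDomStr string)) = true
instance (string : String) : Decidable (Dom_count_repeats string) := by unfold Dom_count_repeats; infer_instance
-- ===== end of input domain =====

-- B replaces A's frequency-dictionary tally with sort-then-scan: sort the characters,
-- then one pass over the sorted list adds the length of every run longer than 1.

-- ===== PORT A =====
def count_repeats (string : String) : Int :=
  let char_count : PySem.Dict Char Int :=
    string.toList.foldl
      (fun d char =>
        if d.contains char then d.insert char (d.getD char 0 + 1)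
        else d.insert char 1)
      PySem.Dict.empty
  (PySem.Dict.values char_count).foldl
    (fun repeated_count count =>
      if count > 1 then repeated_count + count else repeated_count)
    0

-- ===== PORT B =====
-- the outer while loop of Source B: each step consumes one maximal run (inner while = takeWhile)
def pvRunScan : List Char → Int
  | [] => 0
  | c :: rest =>
    let k := (rest.takeWhile (fun x => x == c)).length + 1
    (if 1 < k then (k : Int) else 0) + pvRunScan (rest.dropWhile (fun x => x == c))
termination_by l => l.length
decreasing_by
  simpa using Nat.lt_succ_of_le (List.Sublist.length_le (List.dropWhile_sublist _))

def count_repeats_alt (string : String) : Int :=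
  pvRunScan (PySem.List.sorted string.toList (fun c => c) false)

-- ===== PRECONDITION & SPEC =====
def Spec_count_repeats (string : String) (out : Int) : Prop := out = count_repeats_alt string
instance (string : String) (out : Int) : Decidable (Spec_count_repeats string out) := by unfold Spec_count_repeats; infer_instance

-- ===== CLAIM (what is proved, stated in full; the proofs are below) =====
def Claim_equal_count_repeats : Prop := ∀ (string : String), Dom_count_repeats string → Spec_count_repeats string (count_repeats string)

-- ===== LEMMAS AND PROOFS =====

-- normal form both sides are reduced to: number of character positions whose character repeats
def pvN (l : List Char) : Int := ((l.filter (fun c => decide (1 < l.count c))).length : Int)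

-- A's conditional dict update is pointwise the unconditional counter step.
theorem stepA_eq_counter_step (d : PySem.Dict Char Int) (c : Char) :
    (if d.contains c then d.insert c (d.getD c 0 + 1) else d.insert c 1) =
      d.insert c (d.getD c 0 + 1) := by
  by_cases h : d.contains c = true
  · simp [h]
  · have hget : d.get? c = none := by
      rw [PySem.Dict.get?_eq_none_iff_not_mem_keys]
      intro hm
      apply h
      rw [PySem.Dict.contains_eq_decide_mem_keys]
      simpa using hm
    simp [h, PySem.Dict.getD, hget]

-- Folding the conditional-add over a list equals the sum of an if-zero map.
theorem foldl_if_add_eq_if_sum (L : List Int) (a : Int) :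
    L.foldl (fun acc c => if c > 1 then acc + c else acc) a =
      a + (L.map (fun c => if c > 1 then c else 0)).sum := by
  induction L generalizing a with
  | nil => simp
  | cons x xs ih =>
    by_cases h : x > 1
    · simp [h, ih, add_assoc]
    · simp [h, ih]

-- Summing (count if repeated) over any duplicate-free enumeration of l's characters
-- counts exactly the positions of l holding a repeated character.
theorem sum_if_count_eq_filter_length (d : List Char) :
    ∀ (l : List Char), d.Nodup → (∀ x, x ∈ d ↔ x ∈ l) →
    (d.map (fun c => if 1 < l.count c then (l.count c : Int) else 0)).sum = pvN l := by
  induction d with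
  | nil =>
    intro l _ hm
    have hl : l = [] := List.eq_nil_iff_forall_not_mem.mpr (fun x hx => by simpa using (hm x).mpr hx)
    simp [hl, pvN]
  | cons c d' ih =>
    intro l hd hm
    have hcd' : c ∉ d' := (List.nodup_cons.mp hd).1
    have hd' : d'.Nodup := (List.nodup_cons.mp hd).2
    set r : List Char := l.filter (fun x => !(x == c)) with hr
    have hmem' : ∀ x, x ∈ d' ↔ x ∈ r := by
      intro x
      constructor
      · intro hx
        have hxc : x ≠ c := fun h => hcd' (h ▸ hx)
        have : x ∈ l := (hm x).mp (List.mem_cons_of_mem _ hx)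
        simp [hr, List.mem_filter, this, hxc]
      · intro hx
        have hxl : x ∈ l := List.mem_of_mem_filter hx
        have hxc : x ≠ c := by
          have := (List.mem_filter.mp hx).2
          simpa using this
        rcases List.mem_cons.mp ((hm x).mpr hxl) with h | h
        · exact absurd h hxc
        · exact h
    have hcount : ∀ x, x ≠ c → r.count x = l.count x := by
      intro x hx
      simp [hr, List.count_filter, hx]
    -- rewrite the tail sum to use counts in r
    have hmapeq : d'.map (fun x => if 1 < l.count x then (l.count x : Int) else 0)
        = d'.map (fun x => if 1 < r.count x then (r.count x : Int) else 0) := by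
      apply List.map_congr_left
      intro x hx
      have hxc : x ≠ c := fun h => hcd' (h ▸ hx)
      rw [hcount x hxc]
    -- split l's positions by whether the character is c
    have hperm : (l.filter (fun x => x == c) ++ r).Perm l := by
      simpa [hr] using List.filter_append_perm (fun x => x == c) l
    have hrep : l.filter (fun x => x == c) = List.replicate (l.count c) c := by
      simpa using List.filter_beq (l := l) (a := c)
    have hNl : pvN l = (if 1 < l.count c then (l.count c : Int) else 0) + pvN r := by
      have hflen : (l.filter (fun x => decide (1 < l.count x))).length
          = ((l.filter (fun x => x == c)).filter (fun x => decide (1 < l.count x))).length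
            + ((r.filter (fun x => decide (1 < l.count x)))).length := by
        have := (hperm.filter (fun x => decide (1 < l.count x))).length_eq
        simpa [List.filter_append] using this.symm
      have h1 : ((l.filter (fun x => x == c)).filter (fun x => decide (1 < l.count x))).length
          = if 1 < l.count c then l.count c else 0 := by
        rw [hrep]
        by_cases h : 1 < l.count c
        · simp [h]
        · simp [h]
      have h2 : r.filter (fun x => decide (1 < l.count x))
          = r.filter (fun x => decide (1 < r.count x)) := by
        apply List.filter_congr
        intro x hx
        have hxc : x ≠ c := by
          have := (List.mem_filter.mp hx).2
          simpa [hr] using this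
        rw [hcount x hxc]
      unfold pvN
      rw [hflen, h1, h2]
      split_ifs <;> push_cast <;> ring
    calc ((c :: d').map (fun x => if 1 < l.count x then (l.count x : Int) else 0)).sum
        = (if 1 < l.count c then (l.count c : Int) else 0)
          + (d'.map (fun x => if 1 < r.count x then (r.count x : Int) else 0)).sum := by
          simp [hmapeq]
      _ = (if 1 < l.count c then (l.count c : Int) else 0) + pvN r := by
          rw [ih r hd' hmem']
      _ = pvN l := hNl.symm

-- pvN is invariant under permutation of the list.
theorem pvN_perm (l t : List Char) (h : l.Perm t) : pvN l = pvN t := by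
  have hc : (fun c => decide (1 < l.count c)) = (fun c => decide (1 < t.count c)) := by
    funext c
    rw [h.count_eq]
  unfold pvN
  rw [hc]
  exact congrArg (fun n : Nat => (n : Int)) (h.filter (fun c => decide (1 < t.count c))).length_eq

-- The run scan on a sorted list computes pvN.
theorem runScan_sorted (t : List Char) (hs : t.Pairwise (· ≤ ·)) : pvRunScan t = pvN t := by
  induction t using pvRunScan.induct with
  | case1 => simp [pvRunScan, pvN]
  | case2 c rest ih =>
    set run := rest.takeWhile (fun x => x == c) with hrun
    set rest' := rest.dropWhile (fun x => x == c) with hrest'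
    have hsplit : rest = run ++ rest' := (List.takeWhile_append_dropWhile).symm
    have hrunall : ∀ x ∈ run, x = c := by
      intro x hx
      have := List.mem_takeWhile_imp hx
      simpa using this
    have hsrest : rest.Pairwise (· ≤ ·) := hs.of_cons
    have hcle : ∀ x ∈ rest, c ≤ x := fun x hx => (List.pairwise_cons.mp hs).1 x hx
    have hcnot : c ∉ rest' := by
      intro hcmem
      cases hhd : rest' with
      | nil => simp [hhd] at hcmem
      | cons h tl =>
        have hhne : ¬ (h == c) = true := by
          have := List.head?_dropWhile_not (fun x => x == c) rest
          rw [← hrest'] at this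
          simpa [hhd] using this
        have hhne' : h ≠ c := by simpa using hhne
        have hhrest : h ∈ rest := List.Sublist.mem (by simp [hhd]) (hrest' ▸ List.dropWhile_sublist _)
        have hch : c ≤ h := hcle h hhrest
        rcases List.mem_cons.mp (hhd ▸ hcmem) with h1 | h1
        · exact hhne' h1.symm
        · have hpw : rest'.Pairwise (· ≤ ·) := hsrest.sublist (List.dropWhile_sublist _)
          have hhc : h ≤ c := ((List.pairwise_cons.mp (hhd ▸ hpw)).1) c h1
          exact hhne' (le_antisymm hhc hch)
    have hcountc : (c :: rest).count c = run.length + 1 := by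
      have hrc : run.count c = run.length := by
        rw [List.count_eq_length]
        intro x hx
        exact ((hrunall x hx) ▸ rfl)
      have hr'c : rest'.count c = 0 := List.count_eq_zero.mpr hcnot
      rw [List.count_cons_self, hsplit, List.count_append, hrc, hr'c]
    have hcount' : ∀ x ∈ rest', (c :: rest).count x = rest'.count x := by
      intro x hx
      have hxc : x ≠ c := fun h => hcnot (h ▸ hx)
      have hrx : run.count x = 0 := List.count_eq_zero.mpr
        (fun hmem => hxc (hrunall x hmem))
      simp [hsplit, List.count_append, hrx, Ne.symm hxc]
    have hsort' : rest'.Pairwise (· ≤ ·) := hsrest.sublist (List.dropWhile_sublist _)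
    -- pvN of c :: rest splits into the head run and the tail
    have hN : pvN (c :: rest) = (if 1 < run.length + 1 then ((run.length : Int) + 1) else 0) + pvN rest' := by
      have hcrun : ∀ x ∈ c :: run, x = c := by
        intro x hx
        rcases List.mem_cons.mp hx with h | h
        · exact h
        · exact hrunall x h
      have hlist : c :: rest = (c :: run) ++ rest' := by rw [hsplit]; rfl
      have hfilter1 : (c :: run).filter (fun x => decide (1 < (c :: rest).count x))
          = if 1 < run.length + 1 then c :: run else [] := by
        by_cases h : 1 < run.length + 1
        · rw [if_pos h]
          apply List.filter_eq_self.mpr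
          intro x hx
          rw [hcrun x hx, hcountc]
          simpa using h
        · rw [if_neg h]
          apply List.filter_eq_nil_iff.mpr
          intro x hx
          rw [hcrun x hx, hcountc]
          simpa using h
      have hfilter2 : rest'.filter (fun x => decide (1 < (c :: rest).count x))
          = rest'.filter (fun x => decide (1 < rest'.count x)) := by
        apply List.filter_congr
        intro x hx
        rw [hcount' x hx]
      unfold pvN
      conv_lhs => rw [hlist]
      rw [List.filter_append, ← hlist, hfilter1, hfilter2, List.length_append]
      by_cases h : 1 < run.length + 1
      · rw [if_pos h, if_pos h]
        simp only [List.length_cons]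
        push_cast
        ring
      · rw [if_neg h, if_neg h]
        simp
    rw [pvRunScan]
    rw [← hrun, ← hrest', ih hsort', hN]
    by_cases h : 1 < run.length + 1
    · rw [if_pos h, if_pos h]
      push_cast
      ring
    · rw [if_neg h, if_neg h]

-- ===== VERDICT (by name: the statement is the Claim_ definition above) =====
theorem count_repeats_spec : Claim_equal_count_repeats := by
  intro s _
  unfold Spec_count_repeats count_repeats count_repeats_alt
  -- A side: the dict is Counter(s), and the value fold is the if-zero sum over distinct chars
  have hdict :
      s.toList.foldl
        (fun d char =>
          if d.contains char then d.insert char (d.getD char 0 + 1)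
          else d.insert char 1)
        PySem.Dict.empty = PySem.Dict.counter s.toList := by
    rw [← PySem.Dict.foldl_insert_getD_add_one_eq_counter]
    congr 1
    funext d c
    exact stepA_eq_counter_step d c
  simp only [hdict]
  have hvals : (PySem.Dict.counter s.toList).values =
      (PySem.Set.ofList s.toList).map (fun k => (s.toList.count k : Int)) := by
    simp [PySem.Dict.values, PySem.Dict.items_counter]
  rw [hvals, foldl_if_add_eq_if_sum, zero_add, List.map_map]
  have hA : ((PySem.Set.ofList s.toList).map
      ((fun c => if c > 1 then c else 0) ∘ (fun k => (s.toList.count k : Int)))).sum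
      = pvN s.toList := by
    have hmap : (PySem.Set.ofList s.toList).map
        ((fun c => if c > 1 then c else 0) ∘ (fun k => (s.toList.count k : Int)))
        = (PySem.Set.ofList s.toList).map
          (fun c => if 1 < s.toList.count c then (s.toList.count c : Int) else 0) := by
      apply List.map_congr_left
      intro x _
      simp only [Function.comp]
      by_cases h : 1 < s.toList.count x
      · rw [if_pos h, if_pos (by exact_mod_cast h)]
      · rw [if_neg h, if_neg (by exact_mod_cast h)]
    rw [hmap]
    exact sum_if_count_eq_filter_length _ _ (PySem.Set.nodup_ofList _)
      (fun x => PySem.Set.mem_ofList _ _)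
  rw [hA]
  -- B side: the run scan over the sorted list computes pvN of the sorted list
  have hperm : (PySem.List.sorted s.toList (fun c => c) false).Perm s.toList :=
    PySem.List.sorted_perm _ _ _
  have hpw : (PySem.List.sorted s.toList (fun c => c) false).Pairwise (· ≤ ·) := by
    simpa using PySem.List.sorted_pairwise (xs := s.toList) (key := fun c => c)
  rw [runScan_sorted _ hpw, pvN_perm _ _ hperm.symm]
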